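-- pv_equiv track=rewrite | github.com/eddie-rowe/vertical-farm | backend/app/middleware/cache_middleware.py | _path_matches_pattern
-- ===== SOURCE A (Python) =====
-- def _path_matches_pattern(path: str, pattern: str) -> bool:
--     """Check if path matches a pattern with placeholders"""
--     path_parts = path.strip("/").split("/")
--     pattern_parts = pattern.strip("/").split("/")
--
--     if len(path_parts) != len(pattern_parts):
--         return False
--
--     for path_part, pattern_part in zip(path_parts, pattern_parts):
--         if pattern_part.startswith("{") and pattern_part.endswith("}"):
--             continue  # Wildcard match
--         if path_part != pattern_part:
--             return False
--
--     return True
-- ===== SOURCE B (Python) =====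
-- def _path_matches_pattern(path: str, pattern: str) -> bool:
--     """Single left-to-right scan: compare one segment at a time with two
--     cursors, never materialising the split lists."""
--     p = path.strip("/")
--     q = pattern.strip("/")
--     i = j = 0
--     while True:
--         i2 = p.find("/", i)
--         j2 = q.find("/", j)
--         ps = p[i:] if i2 < 0 else p[i:i2]
--         qs = q[j:] if j2 < 0 else q[j:j2]
--         if not (qs.startswith("{") and qs.endswith("}")) and ps != qs:
--             return False
--         if i2 < 0 and j2 < 0:
--             return True
--         if i2 < 0 or j2 < 0:
--             return False
--         i, j = i2 + 1, j2 + 1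
-- ===== Notes on version B (the rewrite author's own statement) =====
-- stated objective: alternative
-- what changed: Replaces split-into-lists + length check + zip loop by a single two-cursor scan that extracts and compares one segment at a time and never builds the part lists; the length mismatch falls out of one cursor ending early.
import Mathlib
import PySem

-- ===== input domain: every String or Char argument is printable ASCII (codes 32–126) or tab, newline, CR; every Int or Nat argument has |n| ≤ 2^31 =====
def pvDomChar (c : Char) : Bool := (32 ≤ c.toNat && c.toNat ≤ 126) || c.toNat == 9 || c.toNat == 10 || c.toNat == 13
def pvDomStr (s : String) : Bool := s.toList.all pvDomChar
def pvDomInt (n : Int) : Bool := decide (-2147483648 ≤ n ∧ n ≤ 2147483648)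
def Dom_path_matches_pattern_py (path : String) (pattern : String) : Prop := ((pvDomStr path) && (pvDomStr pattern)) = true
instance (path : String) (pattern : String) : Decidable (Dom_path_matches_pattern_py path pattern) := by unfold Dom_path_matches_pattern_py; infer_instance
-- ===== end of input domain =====

-- B replaces A's split-into-lists + length check + zip loop by a single two-cursor
-- segment-at-a-time scan (alternative decomposition, same asymptotic cost).


-- ===== PORT A =====
-- the 'for path_part, pattern_part in zip(...)' loop with its early returns
def aLoop : List (List Char × List Char) → Bool
  | [] => true
  | (pp, qp) :: rest =>
    if PySem.Chars.startswith qp ['{'] && PySem.Chars.endswith qp ['}'] then aLoop rest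
    else if pp ≠ qp then false
    else aLoop rest

def path_matches_pattern_py (path : String) (pattern : String) : Bool :=
  let pathParts := PySem.Chars.splitOn (PySem.Chars.stripChars path.toList ['/']) ['/']
  let patternParts := PySem.Chars.splitOn (PySem.Chars.stripChars pattern.toList ['/']) ['/']
  if pathParts.length ≠ patternParts.length then false
  else aLoop (pathParts.zip patternParts)

-- ===== PORT B =====
-- "k = s.find('/', i); segment = s[i:k]" on the remaining suffix: the segment up to
-- the first '/', and the suffix after that '/' (none when the segment runs to the end)
def segB : List Char → List Char × Option (List Char)
  | [] => ([], none)
  | c :: rest =>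
    if c = '/' then ([], some rest)
    else
      let (s, r) := segB rest
      (c :: s, r)

theorem segB_snd_lt : ∀ (cs r : List Char), (segB cs).2 = some r → r.length < cs.length := by
  intro cs
  induction cs with
  | nil => intro r h; simp [segB] at h
  | cons c rest ih =>
    intro r h
    by_cases hc : c = '/'
    · simp [segB, hc] at h; subst h; simp
    · simp [segB, hc] at h
      exact Nat.lt_trans (ih r h) (Nat.lt_succ_self _)

-- the while-loop of Source B: the two cursors are the remaining suffixes
def goB (p q : List Char) : Bool :=
  let ps := (segB p).1
  let qs := (segB q).1
  if (PySem.Chars.startswith qs ['{'] && PySem.Chars.endswith qs ['}']) = false ∧ ps ≠ qs then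
    false
  else
    match h : (segB p).2, (segB q).2 with
    | none, none => true
    | some pr, some qr => goB pr qr
    | none, some _ => false
    | some _, none => false
termination_by p.length
decreasing_by exact segB_snd_lt p pr h

def path_matches_pattern_py_alt (path : String) (pattern : String) : Bool :=
  goB (PySem.Chars.stripChars path.toList ['/']) (PySem.Chars.stripChars pattern.toList ['/'])

-- ===== PRECONDITION & SPEC =====
def Spec_path_matches_pattern_py (path : String) (pattern : String) (out : Bool) : Prop := out = path_matches_pattern_py_alt path pattern
instance (path : String) (pattern : String) (out : Bool) : Decidable (Spec_path_matches_pattern_py path pattern out) := by unfold Spec_path_matches_pattern_py; infer_instance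

-- ===== CLAIM (what is proved, stated in full; the proofs are below) =====
def Claim_equal_path_matches_pattern_py : Prop := ∀ (path : String) (pattern : String), Dom_path_matches_pattern_py path pattern → Spec_path_matches_pattern_py path pattern (path_matches_pattern_py path pattern)

-- ===== LEMMAS AND PROOFS =====

-- splitting on '/' expressed through segB
def mySplit (cs : List Char) : List (List Char) :=
  (segB cs).1 ::
    (match h : (segB cs).2 with
     | none => []
     | some r => mySplit r)
termination_by cs.length
decreasing_by exact segB_snd_lt cs r h

theorem mySplit_eq (cs : List Char) :
    mySplit cs = (segB cs).1 ::
      (match (segB cs).2 with | none => [] | some r => mySplit r) := by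
  rw [mySplit]; congr 1; split <;> simp_all

theorem go_cons (c : Char) (rest cur : List Char) (acc : List (List Char)) (f : Nat) :
    PySem.Chars.splitOn.go ['/'] (f+1) (c :: rest) cur acc =
      if c = '/' then PySem.Chars.splitOn.go ['/'] f rest [] (cur.reverse :: acc)
      else PySem.Chars.splitOn.go ['/'] f rest (c :: cur) acc := by
  rw [PySem.Chars.splitOn.go]
  by_cases hc : c = '/'
  · simp [hc, List.isPrefixOf]
  · simp [hc, List.isPrefixOf]
    intro h; exact absurd h.symm hc

theorem go_nil (cur : List Char) (acc : List (List Char)) (f : Nat) :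
    PySem.Chars.splitOn.go ['/'] (f+1) [] cur acc = (cur.reverse :: acc).reverse := by
  rw [PySem.Chars.splitOn.go]; simp

theorem go_spec : ∀ (l : List Char) (fuel : Nat), l.length < fuel → ∀ (cur : List Char) (acc : List (List Char)),
    PySem.Chars.splitOn.go ['/'] fuel l cur acc =
      acc.reverse ++ ((cur.reverse ++ (segB l).1) ::
        (match (segB l).2 with | none => [] | some r => mySplit r)) := by
  intro l
  induction l with
  | nil =>
    intro fuel hf cur acc
    obtain ⟨f, rfl⟩ : ∃ f, fuel = f + 1 := ⟨fuel - 1, by omega⟩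
    rw [go_nil]; simp [segB]
  | cons c rest ih =>
    intro fuel hf cur acc
    obtain ⟨f, rfl⟩ : ∃ f, fuel = f + 1 := ⟨fuel - 1, by omega⟩
    have hr : rest.length < f := by simp at hf; omega
    rw [go_cons]
    by_cases hc : c = '/'
    · rw [if_pos hc, ih f hr]
      have hs : segB (c :: rest) = ([], some rest) := by simp [segB, hc]
      rw [hs]
      simp [mySplit_eq rest]
    · rw [if_neg hc, ih f hr]
      have hs : segB (c :: rest) = (c :: (segB rest).1, (segB rest).2) := by
        simp [segB, hc]
      rw [hs]
      simp

theorem splitOn_eq_mySplit (cs : List Char) : PySem.Chars.splitOn cs ['/'] = mySplit cs := by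
  rw [PySem.Chars.splitOn, go_spec cs (cs.length+1) (Nat.lt_succ_self _), mySplit_eq]
  simp

theorem goB_unfold (p q : List Char) :
    goB p q =
      (if (PySem.Chars.startswith (segB q).1 ['{'] && PySem.Chars.endswith (segB q).1 ['}']) = false ∧ (segB p).1 ≠ (segB q).1 then
        false
      else
        match (segB p).2, (segB q).2 with
        | none, none => true
        | some pr, some qr => goB pr qr
        | none, some _ => false
        | some _, none => false) := by
  rw [goB]
  split
  · rfl
  · cases hp : (segB p).2 <;> cases hq : (segB q).2 <;> simp [hp, hq]

theorem mySplit_length_pos (cs : List Char) : 0 < (mySplit cs).length := by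
  rw [mySplit_eq]; simp

theorem mySplit_ne_nil (cs : List Char) : mySplit cs ≠ [] := by
  rw [mySplit_eq]; simp

theorem goB_eq_aux : ∀ (n : Nat) (p q : List Char), p.length ≤ n →
    goB p q = (if (mySplit p).length ≠ (mySplit q).length then false
               else aLoop ((mySplit p).zip (mySplit q))) := by
  intro n
  induction n with
  | zero =>
    intro p q hn
    have hp0 : p = [] := List.eq_nil_of_length_eq_zero (Nat.le_zero.mp hn)
    subst hp0
    rw [goB_unfold, mySplit_eq [], mySplit_eq q]
    cases hq : (segB q).2 <;>
      simp only [segB, hq] <;>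
      by_cases hw : (PySem.Chars.startswith (segB q).1 ['{'] && PySem.Chars.endswith (segB q).1 ['}']) = true <;>
      by_cases hpq : ([] : List Char) = (segB q).1 <;>
      simp [aLoop, hw, hpq, mySplit_length_pos, mySplit_ne_nil]
  | succ n ih =>
    intro p q hn
    rw [goB_unfold, mySplit_eq p, mySplit_eq q]
    cases hp : (segB p).2 <;> cases hq : (segB q).2 <;> simp only [hp, hq]
    · by_cases hw : (PySem.Chars.startswith (segB q).1 ['{'] && PySem.Chars.endswith (segB q).1 ['}']) = true <;>
        by_cases hpq : (segB p).1 = (segB q).1 <;>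
        simp [aLoop, hw, hpq]
    · by_cases hw : (PySem.Chars.startswith (segB q).1 ['{'] && PySem.Chars.endswith (segB q).1 ['}']) = true <;>
        by_cases hpq : (segB p).1 = (segB q).1 <;>
        simp [aLoop, hw, hpq, mySplit_length_pos, mySplit_ne_nil]
    · by_cases hw : (PySem.Chars.startswith (segB q).1 ['{'] && PySem.Chars.endswith (segB q).1 ['}']) = true <;>
        by_cases hpq : (segB p).1 = (segB q).1 <;>
        simp [aLoop, hw, hpq, mySplit_length_pos, mySplit_ne_nil]
    · rename_i pr qr
      have hlt : pr.length < p.length := segB_snd_lt p pr hp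
      have hle : pr.length ≤ n := by omega
      rw [ih pr qr hle]
      by_cases hw : (PySem.Chars.startswith (segB q).1 ['{'] && PySem.Chars.endswith (segB q).1 ['}']) = true <;>
        by_cases hpq : (segB p).1 = (segB q).1 <;>
        by_cases hlen : (mySplit pr).length = (mySplit qr).length <;>
        simp [aLoop, hw, hpq, hlen]

-- ===== VERDICT (by name: the statement is the Claim_ definition above) =====
theorem path_matches_pattern_py_spec : Claim_equal_path_matches_pattern_py := by
  intro path pattern _
  unfold Spec_path_matches_pattern_py path_matches_pattern_py path_matches_pattern_py_alt
  simp only [splitOn_eq_mySplit]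
  exact (goB_eq_aux _ _ _ (Nat.le_refl _)).symm
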